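-- pv_equiv track=rewrite | github.com/yawdotio/a2svcontest1 | A_Soldier_and_Bananas.py | soldiers_and_bananas
-- ===== SOURCE A (Python) =====
-- def soldiers_and_bananas(k,n,w):
--     borrow = 0
--     count = 2
--     cost = k
--     while w > 0:
--         n -= cost
--         if n < 0:
--             borrow -= n
--             n = 0
--         cost = count * k
--         w -= 1
--         count += 1
--     return borrow
-- ===== SOURCE B (Python) =====
-- def soldiers_and_bananas(k, n, w):
--     if w <= 0:
--         return 0
--     return max(0, k * w * (w + 1) // 2 - n)
-- ===== Notes on version B (the rewrite author's own statement) =====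
-- stated objective: faster
-- what changed: Replaces the per-banana subtraction loop by the closed form max(0, k*w*(w+1)//2 - n).
-- outside the precondition, e.g. on soldiers_and_bananas(-1, -5, 2): A returns 4, B returns 2
import Mathlib
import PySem

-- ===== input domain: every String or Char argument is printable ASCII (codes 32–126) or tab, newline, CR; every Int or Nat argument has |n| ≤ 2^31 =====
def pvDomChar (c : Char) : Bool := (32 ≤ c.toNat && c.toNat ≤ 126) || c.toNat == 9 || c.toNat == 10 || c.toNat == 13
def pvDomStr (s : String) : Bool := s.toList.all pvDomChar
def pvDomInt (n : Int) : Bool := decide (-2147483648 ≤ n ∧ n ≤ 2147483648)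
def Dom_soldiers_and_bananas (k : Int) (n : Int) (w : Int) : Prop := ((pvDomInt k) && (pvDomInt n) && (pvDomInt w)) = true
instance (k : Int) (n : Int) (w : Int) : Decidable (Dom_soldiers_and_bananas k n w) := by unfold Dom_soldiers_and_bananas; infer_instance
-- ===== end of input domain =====

-- B replaces A's per-banana subtraction loop by the closed form max(0, k*w*(w+1)//2 - n) (asymptotically faster).


-- ===== PORT A =====
-- A's while loop, state (borrow, count, cost, n, w); k is the fixed price unit
def sbLoop (k borrow count cost n w : Int) : Int :=
  if _h : w > 0 then
    let n1 := n - cost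
    if n1 < 0 then
      sbLoop k (borrow - n1) (count + 1) (count * k) 0 (w - 1)
    else
      sbLoop k borrow (count + 1) (count * k) n1 (w - 1)
  else borrow
termination_by w.toNat
decreasing_by all_goals omega

def soldiers_and_bananas (k : Int) (n : Int) (w : Int) : Int :=
  sbLoop k 0 2 k n w

-- ===== PORT B =====
def soldiers_and_bananas_alt (k : Int) (n : Int) (w : Int) : Int :=
  if w ≤ 0 then 0
  else max 0 (PySem.Int.floordiv (k * w * (w + 1)) 2 - n)

-- ===== PRECONDITION & SPEC =====
-- Pre_ excludes only inputs with a negative price k, cash n even below k, and at least two bananas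
-- (a nonsensical combination no caller would supply), on which A's per-step clamping of n at 0 yields
-- an accidental value (only the first step can ever borrow) that the closed form does not reproduce.
def Pre_soldiers_and_bananas (k : Int) (n : Int) (w : Int) : Prop := ¬ (k < 0 ∧ n < k ∧ 2 ≤ w)
instance (k : Int) (n : Int) (w : Int) : Decidable (Pre_soldiers_and_bananas k n w) := by
  unfold Pre_soldiers_and_bananas; infer_instance

def pvWitness_soldiers_and_bananas : Int × Int × Int := (3, 17, 4)

def Spec_soldiers_and_bananas (k : Int) (n : Int) (w : Int) (out : Int) : Prop := out = soldiers_and_bananas_alt k n w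
instance (k : Int) (n : Int) (w : Int) (out : Int) : Decidable (Spec_soldiers_and_bananas k n w out) := by unfold Spec_soldiers_and_bananas; infer_instance

-- ===== CLAIM (what is proved, stated in full; the proofs are below) =====
def Claim_equal_soldiers_and_bananas : Prop := ∀ (k : Int) (n : Int) (w : Int), Dom_soldiers_and_bananas k n w → Pre_soldiers_and_bananas k n w → Spec_soldiers_and_bananas k n w (soldiers_and_bananas k n w)

-- ===== LEMMAS AND PROOFS =====

-- total price of the remaining bananas, mirroring the loop's cost sequence (c-1)*k, c*k, …
def sbSum (k c w : Int) : Int :=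
  if _h : w > 0 then (c - 1) * k + sbSum k (c + 1) (w - 1) else 0
termination_by w.toNat
decreasing_by omega

theorem sbSum_nonneg (k c w : Int) (hk : 0 ≤ k) (hc : 1 ≤ c) : 0 ≤ sbSum k c w := by
  unfold sbSum
  split
  · have ih := sbSum_nonneg k (c + 1) (w - 1) hk (by omega)
    have h1 : 0 ≤ (c - 1) * k := mul_nonneg (by omega) hk
    linarith
  · exact le_refl 0
termination_by w.toNat
decreasing_by omega

theorem sbLoop_eq (k b c n w : Int) (hk : 0 ≤ k) (hc : 1 ≤ c) (hn : 0 ≤ n ∨ 0 < w) :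
    sbLoop k b c ((c - 1) * k) n w = b + max 0 (sbSum k c w - n) := by
  unfold sbLoop sbSum
  by_cases hw : w > 0
  · simp only [hw, dif_pos]
    have hrec : c * k = (c + 1 - 1) * k := by ring
    by_cases hneg : n - (c - 1) * k < 0
    · simp only [hneg, if_pos]
      rw [hrec, sbLoop_eq k (b - (n - (c - 1) * k)) (c + 1) 0 (w - 1) hk (by omega) (Or.inl le_rfl)]
      have hs := sbSum_nonneg k (c + 1) (w - 1) hk (by omega)
      simp only [sub_zero]
      omega
    · simp only [hneg, if_neg, not_false_iff]
      rw [hrec, sbLoop_eq k b (c + 1) (n - (c - 1) * k) (w - 1) hk (by omega) (Or.inl (by omega))]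
      omega
  · simp only [hw, dif_neg, not_false_iff]
    rcases hn with hn | hn
    · omega
    · omega
termination_by w.toNat
decreasing_by all_goals omega

theorem sbSum_closed (k c w : Int) (hw : 0 ≤ w) : 2 * sbSum k c w = k * w * (2 * c + w - 3) := by
  unfold sbSum
  split
  · rename_i hpos
    have ih := sbSum_closed k (c + 1) (w - 1) (by omega)
    linear_combination ih
  · rename_i hpos
    have : w = 0 := by omega
    subst this
    ring
termination_by w.toNat
decreasing_by omega

theorem sbLoop_neg (k b c n w : Int) (hk : k < 0) (hc : 1 ≤ c) (hn : 0 ≤ n) :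
    sbLoop k b c ((c - 1) * k) n w = b := by
  unfold sbLoop
  split
  · have hcost : (c - 1) * k ≤ 0 := mul_nonpos_of_nonneg_of_nonpos (by omega) (le_of_lt hk)
    have hneg : ¬ (n - (c - 1) * k < 0) := by omega
    simp only [hneg, if_neg, not_false_iff]
    have hrec : c * k = (c + 1 - 1) * k := by ring
    rw [hrec, sbLoop_neg k b (c + 1) (n - (c - 1) * k) (w - 1) hk (by omega) (by omega)]
  · rfl
termination_by w.toNat
decreasing_by all_goals omega

-- ===== VERDICT (by name: the statement is the Claim_ definition above) =====
theorem soldiers_and_bananas_spec : Claim_equal_soldiers_and_bananas := by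
  intro k n w _hdom hpre
  unfold Spec_soldiers_and_bananas soldiers_and_bananas soldiers_and_bananas_alt
  by_cases hw : w ≤ 0
  · simp only [hw, if_pos]
    unfold sbLoop
    simp only [show ¬ (w > 0) by omega, dif_neg, not_false_iff]
  · simp only [hw, if_neg, not_false_iff]
    have hfd : PySem.Int.floordiv (k * w * (w + 1)) 2 = sbSum k 2 w := by
      have hc := sbSum_closed k 2 w (by omega)
      have : k * w * (w + 1) = sbSum k 2 w * 2 := by linarith
      rw [this, PySem.Int.floordiv_eq_ediv_of_pos (by omega)]
      exact Int.mul_ediv_cancel _ (by omega)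
    by_cases hk : 0 ≤ k
    · have := sbLoop_eq k 0 2 n w hk (by omega) (Or.inr (by omega))
      rw [show (2:Int) - 1 = 1 by ring, one_mul] at this
      rw [this, hfd]
      omega
    · -- k < 0
      have hk' : k < 0 := by omega
      rw [hfd]
      unfold sbLoop
      simp only [show w > 0 by omega, dif_pos]
      by_cases h1 : n - k < 0
      · have hw1 : w = 1 := by
          by_contra hw2
          exact hpre ⟨hk', by omega, by omega⟩
        subst hw1
        simp only [h1, if_pos]
        unfold sbLoop
        simp only [show ¬ ((1:Int) - 1 > 0) by omega, dif_neg, not_false_iff]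
        have hs1 := sbSum_closed k 2 1 (by omega)
        omega
      · simp only [h1, if_neg, not_false_iff]
        rw [show (2:Int) * k = (2 + 1 - 1) * k from by ring,
            sbLoop_neg k 0 (2 + 1) (n - k) (w - 1) hk' (by omega) (by omega)]
        have hs2 := sbSum_closed k 2 w (by omega)
        have hww : (2:Int) ≤ w * (w + 1) := by nlinarith
        have hle : k * (w * (w + 1)) ≤ k * 2 := mul_le_mul_of_nonpos_left hww (le_of_lt hk')
        have hring : k * w * (2 * 2 + w - 3) = k * (w * (w + 1)) := by ring
        have : sbSum k 2 w ≤ n := by omega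
        omega
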